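-- pv_equiv track=rewrite | github.com/mplaza27/relevancy | backend/app/services/chunker.py | _carry_overlap
-- ===== SOURCE A (Python) =====
-- def _carry_overlap(sentences: list[str], overlap_chars: int) -> tuple[list[str], int]:
--     """Return the tail of sentences that fits within overlap_chars."""
--     carried: list[str] = []
--     length = 0
--     for s in reversed(sentences):
--         if length + len(s) + 1 > overlap_chars:
--             break
--         carried.insert(0, s)
--         length += len(s) + 1
--     return carried, length
-- ===== SOURCE B (Python) =====
-- def _carry_overlap(sentences: list[str], overlap_chars: int) -> tuple[list[str], int]:
--     """Return the tail of sentences that fits within overlap_chars."""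
--     # suffix[i] = total cost (len + 1 per sentence) of sentences[i:]
--     suffix = [0]
--     for s in reversed(sentences):
--         suffix.append(suffix[-1] + len(s) + 1)
--     suffix.reverse()
--     i = 0
--     while i < len(sentences) and suffix[i] > overlap_chars:
--         i += 1
--     return sentences[i:], suffix[i]
-- ===== Notes on version B (the rewrite author's own statement) =====
-- stated objective: faster
-- what changed: Replaces the reverse scan that mutates a list with insert(0,...) by a precomputed suffix-cost table followed by a forward scan for the first suffix that fits, returned as a slice.
import Mathlib
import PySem

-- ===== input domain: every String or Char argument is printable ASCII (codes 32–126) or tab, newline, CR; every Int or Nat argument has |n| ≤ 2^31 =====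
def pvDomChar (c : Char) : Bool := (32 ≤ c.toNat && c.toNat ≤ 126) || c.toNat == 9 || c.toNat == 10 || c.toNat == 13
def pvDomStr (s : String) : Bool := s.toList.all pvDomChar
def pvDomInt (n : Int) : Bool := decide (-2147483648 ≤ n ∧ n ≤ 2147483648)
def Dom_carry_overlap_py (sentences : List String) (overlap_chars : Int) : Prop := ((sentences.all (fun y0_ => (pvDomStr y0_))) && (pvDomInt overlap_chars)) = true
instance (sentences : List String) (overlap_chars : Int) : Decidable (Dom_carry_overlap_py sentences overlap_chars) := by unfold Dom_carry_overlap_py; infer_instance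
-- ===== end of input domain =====

-- B replaces A's reverse scan-with-break (mutating via insert(0, s)) by a suffix-cost
-- table plus a forward scan returning a slice; objective: alternative decomposition.

-- ===== PORT A =====
-- the for-loop over reversed(sentences) with break; carried.insert(0, s) = cons
def carryLoopA (overlap : Int) : List String → List String × Int → List String × Int
  | [], st => st
  | s :: rest, (carried, length) =>
    if length + PySem.Str.len s + 1 > overlap then (carried, length)
    else carryLoopA overlap rest (s :: carried, length + PySem.Str.len s + 1)

def carry_overlap_py (sentences : List String) (overlap_chars : Int) : List String × Int :=
  carryLoopA overlap_chars sentences.reverse ([], 0)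

-- ===== PORT B =====
-- the loop 'for s in reversed(sentences): suffix.append(suffix[-1]+len(s)+1)' then
-- 'suffix.reverse()': consing to the front of the list with head lookup models
-- append + suffix[-1] + final reverse in one pass, same values in the same order.
def buildSuffixB (sentences : List String) : List Int :=
  sentences.reverse.foldl (fun acc s => (acc.headD 0 + PySem.Str.len s + 1) :: acc) [0]

-- the while loop 'while i < len(sentences) and suffix[i] > overlap_chars: i += 1'
-- followed by 'return sentences[i:], suffix[i]'; the index i is modelled by walking
-- the two lists in parallel (suffix always one element longer than the sentences).
def walkB (overlap : Int) : List Int → List String → List String × Int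
  | c :: _, [] => ([], c)
  | c :: cs, s :: ss => if c > overlap then walkB overlap cs ss else (s :: ss, c)
  | [], ss => (ss, 0)  -- unreachable: buildSuffixB is never empty

def carry_overlap_py_alt (sentences : List String) (overlap_chars : Int) : List String × Int :=
  walkB overlap_chars (buildSuffixB sentences) sentences

-- ===== PRECONDITION & SPEC =====
def Spec_carry_overlap_py (sentences : List String) (overlap_chars : Int) (out : List String × Int) : Prop := out = carry_overlap_py_alt sentences overlap_chars
instance (sentences : List String) (overlap_chars : Int) (out : List String × Int) : Decidable (Spec_carry_overlap_py sentences overlap_chars out) := by unfold Spec_carry_overlap_py; infer_instance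

-- ===== CLAIM (what is proved, stated in full; the proofs are below) =====
def Claim_equal_carry_overlap_py : Prop := ∀ (sentences : List String) (overlap_chars : Int), Dom_carry_overlap_py sentences overlap_chars → Spec_carry_overlap_py sentences overlap_chars (carry_overlap_py sentences overlap_chars)

-- ===== LEMMAS AND PROOFS =====

/-- cost of one sentence in the overlap budget -/
def pvCost (s : String) : Int := PySem.Str.len s + 1

/-- total cost of a sentence list -/
def pvS : List String → Int
  | [] => 0
  | s :: t => pvCost s + pvS t

/-- common functional specification: drop sentences from the front while the
    total cost of the remainder exceeds the budget. -/
def pvSpec : List String → Int → List String × Int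
  | [], _ => ([], 0)
  | s :: t, ov => if pvCost s + pvS t > ov then pvSpec t ov else (s :: t, pvCost s + pvS t)

theorem pvS_nonneg (l : List String) : 0 ≤ pvS l := by
  induction l with
  | nil => simp [pvS]
  | cons s t ih =>
    have h : 0 ≤ PySem.Str.len s := by simp [PySem.Str.len_eq]
    simp [pvS, pvCost]; omega

theorem pvS_append (t : List String) (a : String) : pvS (t ++ [a]) = pvS t + pvCost a := by
  induction t with
  | nil => simp [pvS]
  | cons s t ih => simp [pvS, ih]; ring

/-- greedy take from the head (A's traversal order of the reversed list) -/
def pvG : Int → List String → List String × Int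
  | _, [] => ([], 0)
  | ov, s :: t =>
    if pvCost s > ov then ([], 0)
    else ((pvG (ov - pvCost s) t).1.cons s, pvCost s + (pvG (ov - pvCost s) t).2)

theorem carryLoopA_eq_pvG (r : List String) : ∀ (ov len : Int) (c : List String),
    carryLoopA ov r (c, len)
      = ((pvG (ov - len) r).1.reverse ++ c, len + (pvG (ov - len) r).2) := by
  induction r with
  | nil => intro ov len c; simp [carryLoopA, pvG]
  | cons s t ih =>
    intro ov len c
    simp only [carryLoopA, pvG, pvCost]
    by_cases h : len + PySem.Str.len s + 1 > ov
    · rw [if_pos h, if_pos (by omega)]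
      simp
    · rw [if_neg h, if_neg (by omega), ih]
      have heq : ov - len - (PySem.Str.len s + 1) = ov - (len + PySem.Str.len s + 1) := by ring
      rw [heq, Prod.ext_iff]
      constructor
      · simp
      · simp; ring

theorem pvSpec_all_too_big (t : List String) (a : String) (ov : Int)
    (h : pvCost a > ov) : pvSpec (t ++ [a]) ov = ([], 0) := by
  induction t with
  | nil => simp [pvSpec, pvS, h]
  | cons s t ih =>
    have h1 := pvS_nonneg t
    have h2 : 0 ≤ pvCost s := by simp [pvCost, PySem.Str.len_eq]; omega
    simp only [List.cons_append, pvSpec, pvS_append]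
    rw [if_pos (by omega)]
    exact ih

theorem pvSpec_append (t : List String) (a : String) (ov : Int)
    (h : ¬ pvCost a > ov) :
    pvSpec (t ++ [a]) ov
      = ((pvSpec t (ov - pvCost a)).1 ++ [a], (pvSpec t (ov - pvCost a)).2 + pvCost a) := by
  induction t with
  | nil => simp [pvSpec, pvS]; omega
  | cons s t ih =>
    simp only [List.cons_append, pvSpec, pvS_append]
    by_cases hc : pvCost s + pvS t > ov - pvCost a
    · rw [if_pos (by omega), if_pos hc, ih]
    · rw [if_neg (by omega), if_neg hc]
      simp; ring

theorem pvG_reverse_eq_pvSpec (l : List String) (ov : Int) :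
    ((pvG ov l.reverse).1.reverse, (pvG ov l.reverse).2) = pvSpec l ov := by
  induction l using List.reverseRecOn generalizing ov with
  | nil => simp [pvG, pvSpec]
  | append_singleton t a ih =>
    rw [List.reverse_append]
    simp only [List.reverse_cons, List.reverse_nil, List.nil_append, List.singleton_append]
    by_cases h : pvCost a > ov
    · simp only [pvG]
      rw [if_pos h, pvSpec_all_too_big t a ov h]
      simp
    · simp only [pvG]
      rw [if_neg h, pvSpec_append t a ov h]
      have ih' := ih (ov := ov - pvCost a)
      have h1 : (pvG (ov - pvCost a) t.reverse).1.reverse = (pvSpec t (ov - pvCost a)).1 := by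
        have := congrArg Prod.fst ih'; simpa using this
      have h2 : (pvG (ov - pvCost a) t.reverse).2 = (pvSpec t (ov - pvCost a)).2 := by
        have := congrArg Prod.snd ih'; simpa using this
      simp [h1, h2]
      ring

theorem portA_eq_pvSpec (l : List String) (ov : Int) :
    carry_overlap_py l ov = pvSpec l ov := by
  rw [carry_overlap_py, carryLoopA_eq_pvG]
  simpa using pvG_reverse_eq_pvSpec l ov

theorem buildSuffixB_cons (s : String) (t : List String) :
    buildSuffixB (s :: t) = ((buildSuffixB t).headD 0 + PySem.Str.len s + 1) :: buildSuffixB t := by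
  simp [buildSuffixB, List.foldl_append]

theorem buildSuffixB_head (l : List String) : (buildSuffixB l).headD 0 = pvS l := by
  induction l with
  | nil => simp [buildSuffixB, pvS]
  | cons s t ih =>
    rw [buildSuffixB_cons, pvS]
    simp only [List.headD_eq_head?_getD] at ih ⊢
    simp [ih, pvCost]; ring

theorem portB_eq_pvSpec (l : List String) (ov : Int) :
    carry_overlap_py_alt l ov = pvSpec l ov := by
  rw [carry_overlap_py_alt]
  induction l generalizing ov with
  | nil => simp [buildSuffixB, walkB, pvSpec]
  | cons s t ih =>
    rw [buildSuffixB_cons]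
    rw [List.headD_eq_head?_getD, ← List.headD_eq_head?_getD, buildSuffixB_head]
    have hc : pvS t + PySem.Str.len s + 1 = pvCost s + pvS t := by simp [pvCost]; ring
    by_cases h : pvCost s + pvS t > ov
    · simp only [walkB, hc]
      rw [if_pos h, ih, pvSpec, if_pos h]
    · simp only [walkB, hc]
      rw [if_neg h, pvSpec, if_neg h]


-- ===== VERDICT (by name: the statement is the Claim_ definition above) =====
theorem carry_overlap_py_spec : Claim_equal_carry_overlap_py := by
  intro sentences overlap_chars _
  unfold Spec_carry_overlap_py
  rw [portA_eq_pvSpec, portB_eq_pvSpec]
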